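-- pv_equiv track=rewrite | github.com/Ashis101/py-dsa | stack/nextgret.py | nextgret
-- ===== SOURCE A (Python) =====
-- def nextgret(arr):
--     stack=[]
--     for j in range(len(arr)):
--         for i in range(j+1,len(arr)):
--             if arr[j] < arr[i]:
--                 gret=arr[i]
--                 stack.append(gret)
--             else:
--                 break
--     stack.append(-1)
--     return stack
-- ===== SOURCE B (Python) =====
-- def nextgret(arr):
--     # Jump-pointer DP: bound[j] = first index i > j with arr[i] <= arr[j] (else n),
--     # computed right-to-left by jumping through already-known bounds.
--     n = len(arr)
--     bound = [n] * n
--     for j in range(n - 1, -1, -1):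
--         i = j + 1
--         while i < n and arr[i] > arr[j]:
--             i = bound[i]
--         bound[j] = i
--     out = []
--     for j in range(n):
--         out.extend(arr[j + 1:bound[j]])
--     out.append(-1)
--     return out
-- ===== Notes on version B (the rewrite author's own statement) =====
-- stated objective: alternative
-- what changed: Replaces A's per-index forward rescans with a right-to-left jump-pointer DP that precomputes each index's run boundary (first later index with a <= element), then emits the runs as slices; boundary jumps skip whole runs instead of rescanning element by element.
import Mathlib
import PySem

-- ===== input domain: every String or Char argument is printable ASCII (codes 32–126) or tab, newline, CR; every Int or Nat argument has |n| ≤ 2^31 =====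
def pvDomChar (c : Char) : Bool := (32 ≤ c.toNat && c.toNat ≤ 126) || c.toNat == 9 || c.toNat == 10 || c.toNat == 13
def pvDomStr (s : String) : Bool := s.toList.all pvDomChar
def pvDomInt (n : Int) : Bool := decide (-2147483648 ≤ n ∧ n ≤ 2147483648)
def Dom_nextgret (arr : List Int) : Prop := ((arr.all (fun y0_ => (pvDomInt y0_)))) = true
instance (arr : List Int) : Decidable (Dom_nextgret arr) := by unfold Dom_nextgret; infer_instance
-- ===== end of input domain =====

-- B replaces A's per-index forward rescans by a right-to-left jump-pointer DP over run boundaries (alternative decomposition, same results).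

-- ===== PORT A =====
-- A's inner loop: for i in range(j+1, len(arr)): if arr[j] < arr[i]: append arr[i] else break.
-- arr[i] with 0 ≤ i < len(arr) never raises, so arr.getD i 0 is exact here.
def pvInnerA (arr : List Int) (v : Int) (i : Nat) : List Int :=
  if _h : i < arr.length then
    if v < arr.getD i 0 then arr.getD i 0 :: pvInnerA arr v (i + 1) else []
  else []
termination_by arr.length - i

def nextgret (arr : List Int) : List Int :=
  ((List.range arr.length).foldl
    (fun stack j => stack ++ pvInnerA arr (arr.getD j 0) (j + 1)) []) ++ [-1]

-- ===== PORT B =====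
-- B's while loop `while i < n and arr[i] > arr[j]: i = bound[i]`; the fuel argument only
-- makes the loop total (bound[k] > k for already-computed k, so n steps always suffice).
def pvJump (arr : List Int) (bound : List Nat) (n : Nat) (v : Int) : Nat → Nat → Nat
  | 0, i => i
  | fuel + 1, i =>
      if i < n ∧ v < arr.getD i 0 then pvJump arr bound n v fuel (bound.getD i n) else i

-- B's first pass: for j in range(n-1, -1, -1): ... bound[j] = i
def pvBounds (arr : List Int) (n : Nat) : List Nat :=
  ((List.range n).reverse).foldl
    (fun bound j => bound.set j (pvJump arr bound n (arr.getD j 0) n (j + 1)))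
    (List.replicate n n)

def nextgret_alt (arr : List Int) : List Int :=
  let n := arr.length
  let bound := pvBounds arr n
  ((List.range n).foldl
    (fun (out : List Int) (j : Nat) =>
      out ++ PySem.List.slice arr (some ((j + 1 : Nat) : Int)) (some ((bound.getD j n : Nat) : Int))) []) ++ [-1]

-- ===== PRECONDITION & SPEC =====
def Spec_nextgret (arr : List Int) (out : List Int) : Prop := out = nextgret_alt arr
instance (arr : List Int) (out : List Int) : Decidable (Spec_nextgret arr out) := by unfold Spec_nextgret; infer_instance

-- ===== CLAIM (what is proved, stated in full; the proofs are below) =====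
def Claim_equal_nextgret : Prop := ∀ (arr : List Int), Dom_nextgret arr → Spec_nextgret arr (nextgret arr)

-- ===== LEMMAS AND PROOFS =====

-- Specification of a run boundary: first index k ≥ i with ¬ v < arr[k], else len.
def pvBSpec (arr : List Int) (v : Int) (i : Nat) : Nat :=
  if _h : i < arr.length then
    if v < arr.getD i 0 then pvBSpec arr v (i + 1) else i
  else i
termination_by arr.length - i

theorem pvBSpec_ge (arr : List Int) (v : Int) (i : Nat) : i ≤ pvBSpec arr v i := by
  fun_induction pvBSpec arr v i with
  | case1 i h hv ih => omega
  | case2 i h hv => omega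
  | case3 i h => omega

theorem pvBSpec_le (arr : List Int) (v : Int) (i : Nat) (hi : i ≤ arr.length) :
    pvBSpec arr v i ≤ arr.length := by
  fun_induction pvBSpec arr v i with
  | case1 i h hv ih => exact ih (by omega)
  | case2 i h hv => omega
  | case3 i h => omega

theorem pvBSpec_mem (arr : List Int) (v : Int) (i : Nat) :
    ∀ k, i ≤ k → k < pvBSpec arr v i → v < arr.getD k 0 := by
  fun_induction pvBSpec arr v i with
  | case1 i h hv ih =>
      intro k hk1 hk2
      rcases Nat.eq_or_lt_of_le hk1 with rfl | hk1'
      · exact hv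
      · exact ih k (by omega) hk2
  | case2 i h hv => intro k hk1 hk2; omega
  | case3 i h => intro k hk1 hk2; omega

theorem pvBSpec_stop (arr : List Int) (v : Int) (i : Nat)
    (hcond : ¬ (i < arr.length ∧ v < arr.getD i 0)) : pvBSpec arr v i = i := by
  unfold pvBSpec
  by_cases h : i < arr.length
  · have hnv : ¬ v < arr.getD i 0 := fun hv => hcond ⟨h, hv⟩
    rw [dif_pos h, if_neg hnv]
  · rw [dif_neg h]

theorem pvBSpec_step (arr : List Int) (v : Int) (i : Nat)
    (h : i < arr.length) (hv : v < arr.getD i 0) :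
    pvBSpec arr v i = pvBSpec arr v (i + 1) := by
  conv_lhs => rw [pvBSpec]
  rw [dif_pos h, if_pos hv]

theorem pvBSpec_skip (arr : List Int) (v : Int) :
    ∀ d i m, m - i = d → i ≤ m → m ≤ arr.length →
      (∀ k, i ≤ k → k < m → v < arr.getD k 0) → pvBSpec arr v i = pvBSpec arr v m := by
  intro d
  induction d with
  | zero =>
      intro i m h1 h2 _ _
      have he : i = m := by omega
      subst he
      rfl
  | succ d ih =>
      intro i m h1 h2 h3 h4
      have hi : i < arr.length := by omega
      have hv : v < arr.getD i 0 := h4 i (le_refl _) (by omega)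
      rw [pvBSpec_step arr v i hi hv]
      exact ih (i + 1) m (by omega) (by omega) h3 (fun k hk1 hk2 => h4 k (by omega) hk2)

-- A's inner loop collects exactly the slice arr[i : pvBSpec arr v i].
theorem pvInnerA_eq (arr : List Int) (v : Int) (i : Nat) :
    pvInnerA arr v i = (arr.drop i).take (pvBSpec arr v i - i) := by
  fun_induction pvInnerA arr v i with
  | case1 i h hv ih =>
      have hb : pvBSpec arr v i = pvBSpec arr v (i + 1) := pvBSpec_step arr v i h hv
      have hge : i + 1 ≤ pvBSpec arr v (i + 1) := pvBSpec_ge arr v (i + 1)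
      have hdrop : arr.drop i = arr[i] :: arr.drop (i + 1) := List.drop_eq_getElem_cons h
      have hgetD : arr.getD i 0 = arr[i] := by
        simp [List.getD, List.getElem?_eq_getElem h]
      rw [hb, hdrop, hgetD, ih]
      have : pvBSpec arr v (i + 1) - i = (pvBSpec arr v (i + 1) - (i + 1)) + 1 := by omega
      rw [this, List.take_succ_cons]
  | case2 i h hv =>
      have hb : pvBSpec arr v i = i := pvBSpec_stop arr v i (fun ⟨_, hv'⟩ => hv hv')
      simp [hb]
  | case3 i h =>
      have hb : pvBSpec arr v i = i := pvBSpec_stop arr v i (fun ⟨h', _⟩ => h h')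
      simp [hb]

-- B's jump loop computes pvBSpec, given correct bounds above m.
theorem pvJump_eq (arr : List Int) (bound : List Nat) (m : Nat) (v : Int)
    (hb : ∀ k, m < k → k < arr.length →
        bound.getD k arr.length = pvBSpec arr (arr.getD k 0) (k + 1)) :
    ∀ fuel i, m < i → i ≤ arr.length → arr.length - i ≤ fuel →
      pvJump arr bound arr.length v fuel i = pvBSpec arr v i := by
  intro fuel
  induction fuel with
  | zero =>
      intro i h1 h2 h3
      have : i = arr.length := by omega
      subst this
      rw [pvBSpec_stop arr v _ (by omega)]
      rfl
  | succ fuel ih =>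
      intro i h1 h2 h3
      unfold pvJump
      by_cases hc : i < arr.length ∧ v < arr.getD i 0
      · simp only [if_pos hc]
        obtain ⟨hin, hv⟩ := hc
        have hbi : bound.getD i arr.length = pvBSpec arr (arr.getD i 0) (i + 1) :=
          hb i h1 hin
        set b := pvBSpec arr (arr.getD i 0) (i + 1) with hbdef
        have hb1 : i + 1 ≤ b := pvBSpec_ge arr _ _
        have hb2 : b ≤ arr.length := pvBSpec_le arr _ _ (by omega)
        have hskip : pvBSpec arr v i = pvBSpec arr v b := by
          apply pvBSpec_skip arr v (b - i) i b rfl (by omega) hb2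
          intro k hk1 hk2
          rcases Nat.eq_or_lt_of_le hk1 with rfl | hk1'
          · exact hv
          · exact lt_trans hv (pvBSpec_mem arr (arr.getD i 0) (i + 1) k (by omega) hk2)
        rw [hbi, hskip]
        exact ih b (by omega) hb2 (by omega)
      · simp only [if_neg hc]
        exact (pvBSpec_stop arr v i hc).symm

theorem pvBounds_aux (arr : List Int) :
    ∀ (m : Nat) (bound : List Nat), bound.length = arr.length → m ≤ arr.length →
      (∀ k, m ≤ k → k < arr.length →
          bound.getD k arr.length = pvBSpec arr (arr.getD k 0) (k + 1)) →
      ∀ j, j < arr.length →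
        (((List.range m).reverse).foldl
          (fun b j => b.set j (pvJump arr b arr.length (arr.getD j 0) arr.length (j + 1)))
          bound).getD j arr.length = pvBSpec arr (arr.getD j 0) (j + 1) := by
  intro m
  induction m with
  | zero =>
      intro bound hlen _ hk j hj
      simpa using hk j (Nat.zero_le j) hj
  | succ m ih =>
      intro bound hlen hm hk j hj
      rw [List.range_succ, List.reverse_append]
      simp only [List.reverse_singleton, List.singleton_append, List.foldl_cons]
      set val := pvJump arr bound arr.length (arr.getD m 0) arr.length (m + 1) with hval
      have hvaleq : val = pvBSpec arr (arr.getD m 0) (m + 1) := by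
        apply pvJump_eq arr bound m (arr.getD m 0)
          (fun k hk1 hk2 => hk k (by omega) hk2) arr.length (m + 1) (by omega) hm (by omega)
      apply ih (bound.set m val) (by simp [hlen]) (by omega) _ j hj
      intro k hk1 hk2
      by_cases hkm : k = m
      · subst hkm
        have : k < bound.length := by omega
        simp [List.getD, this, hvaleq]
      · have : (bound.set m val).getD k arr.length = bound.getD k arr.length := by
          simp [List.getD, Ne.symm hkm]
        rw [this]
        exact hk k (by omega) hk2

theorem pvBounds_correct (arr : List Int) (j : Nat) (hj : j < arr.length) :
    (pvBounds arr arr.length).getD j arr.length = pvBSpec arr (arr.getD j 0) (j + 1) := by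
  apply pvBounds_aux arr arr.length (List.replicate arr.length arr.length)
    (by simp) (le_refl _) _ j hj
  intro k hk1 hk2
  omega

-- ===== VERDICT (by name: the statement is the Claim_ definition above) =====
theorem nextgret_spec : Claim_equal_nextgret := by
  intro arr _
  unfold Spec_nextgret nextgret nextgret_alt
  simp only []
  congr 1
  apply PySem.List.foldl_congr_mem
  intro acc j hj
  have hjlt : j < arr.length := List.mem_range.mp hj
  congr 1
  rw [pvBounds_correct arr j hjlt, pvInnerA_eq]
  rw [PySem.List.slice_natCast]
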